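-- pv_equiv track=rewrite | github.com/Yuvv/LeetCode | 1501-1600/1590-make-sum-divisible-by-p.py | minSubarray_tle
-- ===== SOURCE A (Python) =====
-- from typing import List
--
-- def minSubarray_tle(nums: List[int], p: int) -> int:
--     n_nums = len(nums)
--     prefix_sum = [0]
--     for n in nums:
--         prefix_sum.append((prefix_sum[-1] + n) % p)
--
--     target_val = prefix_sum[-1]
--     if target_val == 0:
--         return 0
--
--     min_len = n_nums
--     for i in range(n_nums):
--         for j in range(i + 1, n_nums + 1):
--             v = (prefix_sum[j] - prefix_sum[i]) % p
--             if v == target_val: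
--                 min_len = min(min_len, j - i)
--                 # first one is best one
--                 break
--         # fast return
--         if min_len == 1:
--             return min_len
--     if min_len == n_nums:
--         return -1
--     return min_len
-- ===== SOURCE B (Python) =====
-- from typing import List
--
-- def minSubarray_tle(nums: List[int], p: int) -> int:
--     # one-pass prefix-remainder hashmap (last index per remainder), O(n)
--     n = len(nums)
--     total = sum(nums) % p
--     if total == 0:
--         return 0
--     last = {0: 0}
--     best = n
--     cur = 0
--     for j, x in enumerate(nums, 1):
--         cur = (cur + x) % p
--         need = (cur - total) % p
--         if need in last:
--             best = min(best, j - last[need])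
--         last[cur] = j
--     return -1 if best == n else best
-- ===== Notes on version B (the rewrite author's own statement) =====
-- stated objective: faster
-- what changed: Replaced A's quadratic double loop over prefix-remainder pairs by the standard one-pass hashmap of last index per prefix remainder, looking up (cur - total) % p at each position.
-- intended difference: On single-element lists with nums[0] % p != 0, A's fast-return 'min_len == 1' bypasses its own whole-array check and returns 1, while B returns -1, the intended answer since removing the entire array is disallowed (A's final '-1' mapping encodes exactly that intent). — e.g. on minSubarray_tle([3], 5): A returns 1, B returns -1
-- outside the precondition, e.g. on minSubarray_tle([], 0): A returns 0, B raises ZeroDivisionError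
import Mathlib
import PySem

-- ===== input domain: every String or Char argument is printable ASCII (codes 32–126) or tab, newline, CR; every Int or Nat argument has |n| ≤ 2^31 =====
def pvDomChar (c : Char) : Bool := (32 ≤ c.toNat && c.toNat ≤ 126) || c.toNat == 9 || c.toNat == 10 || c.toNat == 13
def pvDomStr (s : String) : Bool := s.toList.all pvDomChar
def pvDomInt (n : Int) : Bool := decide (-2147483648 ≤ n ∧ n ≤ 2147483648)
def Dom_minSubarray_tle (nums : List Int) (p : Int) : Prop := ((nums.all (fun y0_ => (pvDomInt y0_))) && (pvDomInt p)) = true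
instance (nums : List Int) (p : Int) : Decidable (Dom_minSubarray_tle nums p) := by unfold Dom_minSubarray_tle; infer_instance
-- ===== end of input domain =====

-- B replaces A's quadratic double loop by a one-pass last-index-per-prefix-remainder hashmap (asymptotically faster);
-- on single-element lists with nums[0] % p != 0 A's fast-return bypasses its own whole-array check and returns 1,
-- B returns the intended -1 (stated as D_ below).


-- ===== PORT A =====
-- inner loop: first j in js with (prefix_sum[j] - prefix_sum[i]) % p == target (the 'break')
def pvAFirst (ps : List Int) (p t i : Int) : List Int → Option Int
  | [] => none
  | j :: rest =>
    if PySem.Int.mod (PySem.List.pyGetD ps j 0 - PySem.List.pyGetD ps i 0) p = t then some j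
    else pvAFirst ps p t i rest

-- outer loop over i with the 'fast return' when min_len == 1
def pvAOuter (ps : List Int) (p t n : Int) : List Int → Int → Int
  | [], ml => if ml = n then -1 else ml
  | i :: rest, ml =>
    let ml' := match pvAFirst ps p t i (PySem.List.pyRange (i + 1) (n + 1) 1) with
      | some j => min ml (j - i)
      | none => ml
    if ml' = 1 then ml' else pvAOuter ps p t n rest ml'

def minSubarray_tle (nums : List Int) (p : Int) : Int :=
  let n_nums : Int := nums.length
  let prefix_sum :=
    nums.foldl (fun acc x => acc ++ [PySem.Int.mod (PySem.List.pyGetD acc (-1) 0 + x) p]) [0]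
  let target_val := PySem.List.pyGetD prefix_sum (-1) 0
  if target_val = 0 then 0
  else pvAOuter prefix_sum p target_val n_nums (PySem.List.pyRange 0 n_nums 1) n_nums

-- ===== PORT B =====
def minSubarray_tle_alt (nums : List Int) (p : Int) : Int :=
  let n : Int := nums.length
  let total := PySem.Int.mod nums.sum p
  if total = 0 then 0
  else
    let st :=
      (PySem.List.enumerate nums 1).foldl
        (fun (st : Int × Int × PySem.Dict Int Int) (jx : Int × Int) =>
          let cur := PySem.Int.mod (st.2.1 + jx.2) p
          let need := PySem.Int.mod (cur - total) p
          let best :=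
            match st.2.2.get? need with
            | some i => min st.1 (jx.1 - i)
            | none => st.1
          (best, cur, st.2.2.insert cur jx.1))
        (n, 0, PySem.Dict.ofList [((0 : Int), (0 : Int))])
    if st.1 = n then -1 else st.1

-- ===== PRECONDITION & SPEC =====
-- Pre_ excludes p = 0, on which Python raises ZeroDivisionError at the first '% p' (on the empty list A happens
-- to return 0 before ever dividing, but B's sum(nums) % p raises there).
def Pre_minSubarray_tle (nums : List Int) (p : Int) : Prop := p ≠ 0
instance (nums : List Int) (p : Int) : Decidable (Pre_minSubarray_tle nums p) := by
  unfold Pre_minSubarray_tle; infer_instance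
def pvWitness_minSubarray_tle : List Int × Int := ([1, 2, 4, 3], 6)

-- On single-element lists with nums[0] % p ≠ 0, A's fast-return 'min_len == 1' bypasses its own whole-array
-- check and returns 1; B returns -1, the intended answer since removing the entire array is disallowed
-- (A's own final '-1' mapping encodes exactly that intent).
def D_minSubarray_tle (nums : List Int) (p : Int) : Prop :=
  nums.length = 1 ∧ PySem.Int.mod (nums.headD 0) p ≠ 0
instance (nums : List Int) (p : Int) : Decidable (D_minSubarray_tle nums p) := by
  unfold D_minSubarray_tle; infer_instance

def Spec_minSubarray_tle (nums : List Int) (p : Int) (out : Int) : Prop :=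
  ¬ D_minSubarray_tle nums p → out = minSubarray_tle_alt nums p
instance (nums : List Int) (p : Int) (out : Int) : Decidable (Spec_minSubarray_tle nums p out) := by
  unfold Spec_minSubarray_tle; infer_instance

def pvDiffWitness_minSubarray_tle : List Int × Int := ([3], 5)
def pvDiffWitnessOut_minSubarray_tle : Int × Int := (1, -1)

-- ===== CLAIM (what is proved, stated in full; the proofs are below) =====
def Claim_unchanged_minSubarray_tle : Prop := ∀ (nums : List Int) (p : Int), Dom_minSubarray_tle nums p → Pre_minSubarray_tle nums p → Spec_minSubarray_tle nums p (minSubarray_tle nums p)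
def Claim_changed_minSubarray_tle : Prop := Dom_minSubarray_tle (pvDiffWitness_minSubarray_tle.1) (pvDiffWitness_minSubarray_tle.2) ∧ Pre_minSubarray_tle (pvDiffWitness_minSubarray_tle.1) (pvDiffWitness_minSubarray_tle.2) ∧ D_minSubarray_tle (pvDiffWitness_minSubarray_tle.1) (pvDiffWitness_minSubarray_tle.2) ∧ minSubarray_tle (pvDiffWitness_minSubarray_tle.1) (pvDiffWitness_minSubarray_tle.2) = pvDiffWitnessOut_minSubarray_tle.1 ∧ minSubarray_tle_alt (pvDiffWitness_minSubarray_tle.1) (pvDiffWitness_minSubarray_tle.2) = pvDiffWitnessOut_minSubarray_tle.2 ∧ pvDiffWitnessOut_minSubarray_tle.1 ≠ pvDiffWitnessOut_minSubarray_tle.2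
def Claim_exact_minSubarray_tle : Prop := ∀ (nums : List Int) (p : Int), Dom_minSubarray_tle nums p → Pre_minSubarray_tle nums p → D_minSubarray_tle nums p → minSubarray_tle nums p ≠ minSubarray_tle_alt nums p

-- ===== LEMMAS AND PROOFS =====

-- prefix remainders as a function of the index
def pvG (nums : List Int) (p : Int) : Nat → Int
  | 0 => 0
  | k + 1 => PySem.Int.mod (pvG nums p k + nums.getD k 0) p

-- mod toolkit
theorem pvModDvd (a p : Int) : p ∣ (a - PySem.Int.mod a p) := by
  refine ⟨PySem.Int.floordiv a p, ?_⟩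
  have h := PySem.Int.floordiv_mul_add_mod a p
  linarith [h]

theorem pvModCongr {a b p : Int} (hp : p ≠ 0) (h : p ∣ (a - b)) :
    PySem.Int.mod a p = PySem.Int.mod b p := by
  have h1 := pvModDvd a p
  have h2 := pvModDvd b p
  have hd : p ∣ (PySem.Int.mod a p - PySem.Int.mod b p) := by
    have he : PySem.Int.mod a p - PySem.Int.mod b p
        = (a - b) - (a - PySem.Int.mod a p) + (b - PySem.Int.mod b p) := by ring
    rw [he]
    exact dvd_add (dvd_sub h h1) h2
  have hz : PySem.Int.mod a p - PySem.Int.mod b p = 0 := by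
    rcases lt_or_gt_of_ne hp with hneg | hpos
    · have ba := PySem.Int.mod_neg_bounds a hneg
      have bb := PySem.Int.mod_neg_bounds b hneg
      refine Int.eq_zero_of_abs_lt_dvd ((abs_dvd p _).mpr hd) ?_
      rw [abs_of_neg hneg]; rw [abs_lt]; omega
    · have ba1 := PySem.Int.mod_nonneg a hpos
      have ba2 := PySem.Int.mod_lt a hpos
      have bb1 := PySem.Int.mod_nonneg b hpos
      have bb2 := PySem.Int.mod_lt b hpos
      refine Int.eq_zero_of_abs_lt_dvd hd ?_
      rw [abs_lt]; omega
  omega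

theorem pvModIdem {p : Int} (hp : p ≠ 0) (a : Int) :
    PySem.Int.mod (PySem.Int.mod a p) p = PySem.Int.mod a p := by
  refine pvModCongr hp ?_
  have h := pvModDvd a p
  have he : PySem.Int.mod a p - a = -(a - PySem.Int.mod a p) := by ring
  rw [he]
  exact dvd_neg.mpr h

theorem pvCondIff {p t v : Int} (hp : p ≠ 0) (hv : PySem.Int.mod v p = v)
    (ht : PySem.Int.mod t p = t) (u : Int) :
    PySem.Int.mod (u - v) p = t ↔ v = PySem.Int.mod (u - t) p := by
  constructor
  · intro h
    have hd : p ∣ ((u - t) - v) := by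
      have := pvModDvd (u - v) p
      rw [h] at this
      have he : (u - t) - v = (u - v) - t := by ring
      rw [he]; exact this
    rw [← hv]
    exact (pvModCongr hp hd).symm
  · intro h
    have hd : p ∣ ((u - v) - t) := by
      have h1 := pvModDvd (u - t) p
      rw [← h] at h1
      have he : (u - v) - t = (u - t) - v := by ring
      rw [he]; exact h1
    rw [pvModCongr hp hd, ht]

theorem pvG_reduced (nums : List Int) {p : Int} (hp : p ≠ 0) (k : Nat) :
    PySem.Int.mod (pvG nums p k) p = pvG nums p k := by
  cases k with
  | zero => exact (PySem.Int.mod_eq_zero_iff_dvd 0 p).mpr (dvd_zero p)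
  | succ k => exact pvModIdem hp _

theorem pvMod_zero (p : Int) : PySem.Int.mod 0 p = 0 :=
  (PySem.Int.mod_eq_zero_iff_dvd 0 p).mpr (dvd_zero p)

theorem pvG_append (xs ys : List Int) (p : Int) {k : Nat} (hk : k ≤ xs.length) :
    pvG (xs ++ ys) p k = pvG xs p k := by
  induction k with
  | zero => rfl
  | succ k ih =>
    have hk' : k ≤ xs.length := Nat.le_of_succ_le hk
    simp only [pvG, ih hk']
    congr 1
    congr 1
    exact List.getD_append _ _ _ _ (by omega)

theorem pvSum_eq (nums : List Int) {p : Int} (hp : p ≠ 0) :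
    PySem.Int.mod nums.sum p = pvG nums p nums.length := by
  induction nums using List.reverseRecOn with
  | nil => simpa using pvMod_zero p
  | append_singleton xs x ih =>
    have hlen : (xs ++ [x]).length = xs.length + 1 := by simp
    rw [hlen]
    simp only [pvG]
    have hget : (xs ++ [x]).getD xs.length 0 = x := by
      simp [List.getD]
    rw [hget, pvG_append xs [x] p (le_refl _)]
    have hsum : (xs ++ [x]).sum = xs.sum + x := by simp
    rw [hsum]
    have hd : p ∣ ((xs.sum + x) - (pvG xs p xs.length + x)) := by
      have h1 := pvModDvd xs.sum p
      rw [ih] at h1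
      have he : (xs.sum + x) - (pvG xs p xs.length + x) = xs.sum - pvG xs p xs.length := by ring
      rw [he]; exact h1
    exact pvModCongr hp hd

-- the prefix_sum list A builds
theorem pvPrefix_eq (nums : List Int) (p : Int) :
    nums.foldl (fun acc x => acc ++ [PySem.Int.mod (PySem.List.pyGetD acc (-1) 0 + x) p]) [0]
      = (List.range (nums.length + 1)).map (pvG nums p) := by
  induction nums using List.reverseRecOn with
  | nil => simp [pvG]
  | append_singleton xs x ih =>
    rw [List.foldl_append, ih]
    have hlast : PySem.List.pyGetD ((List.range (xs.length + 1)).map (pvG xs p)) (-1) 0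
        = pvG xs p xs.length := by
      simp [PySem.List.pyGetD, PySem.List.pyGet?, PySem.List.pyIdx?]
    simp only [List.foldl_cons, List.foldl_nil, hlast]
    have hlen : (xs ++ [x]).length = xs.length + 1 := by simp
    rw [hlen]
    have h1 : (List.range (xs.length + 1)).map (pvG (xs ++ [x]) p)
        = (List.range (xs.length + 1)).map (pvG xs p) := by
      refine List.map_congr_left ?_
      intro k hk
      exact pvG_append xs [x] p (by simpa using Nat.lt_succ_iff.mp (List.mem_range.mp hk))
    have h2 : pvG (xs ++ [x]) p (xs.length + 1) = PySem.Int.mod (pvG xs p xs.length + x) p := by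
      simp only [pvG]
      rw [pvG_append xs [x] p (le_refl _)]
      congr 2
      simp [List.getD]
    have hr : (List.range (xs.length + 1 + 1)).map (pvG (xs ++ [x]) p)
        = (List.range (xs.length + 1)).map (pvG xs p)
            ++ [PySem.Int.mod (pvG xs p xs.length + x) p] := by
      rw [List.range_succ, List.map_append, h1]
      simp [h2]
    rw [hr]

theorem pvPs_get (nums : List Int) (p : Int) {k : Nat} (hk : k ≤ nums.length) :
    PySem.List.pyGetD ((List.range (nums.length + 1)).map (pvG nums p)) (k : Int) 0
      = pvG nums p k := by
  rw [PySem.List.pyGetD_natCast]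
  simp [List.getD, Nat.lt_succ_of_le hk]

theorem pvPs_last (nums : List Int) (p : Int) :
    PySem.List.pyGetD ((List.range (nums.length + 1)).map (pvG nums p)) (-1) 0
      = pvG nums p nums.length := by
  simp [PySem.List.pyGetD, PySem.List.pyGet?, PySem.List.pyIdx?]

-- valid removal lengths and the best value
def pvValid (nums : List Int) (p t : Int) (L : Int) : Prop :=
  ∃ i j : Nat, i < j ∧ j ≤ nums.length ∧
    PySem.Int.mod (pvG nums p j - pvG nums p i) p = t ∧ L = (j : Int) - (i : Int)

def pvIsBest (nums : List Int) (p t m : Int) : Prop :=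
  (m = (nums.length : Int) ∨ pvValid nums p t m) ∧ m ≤ (nums.length : Int) ∧
    ∀ L, pvValid nums p t L → m ≤ L

theorem pvValid_ge_one {nums : List Int} {p t L : Int} (h : pvValid nums p t L) : 1 ≤ L := by
  obtain ⟨i, j, hij, _, _, hL⟩ := h
  have : (i : Int) < (j : Int) := by exact_mod_cast hij
  omega

theorem pvBest_unique {nums : List Int} {p t m m' : Int} (hn : 1 ≤ nums.length)
    (h : pvIsBest nums p t m) (h' : pvIsBest nums p t m') : m = m' := by
  obtain ⟨hv, hle, hlb⟩ := h
  obtain ⟨hv', hle', hlb'⟩ := h'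
  have h1 : m ≤ m' := by
    rcases hv' with he | hval
    · omega
    · exact hlb _ hval
  have h2 : m' ≤ m := by
    rcases hv with he | hval
    · omega
    · exact hlb' _ hval
  omega

-- A-side inner loop characterisation
theorem pvAFirst_some_gen (ps : List Int) (p t i : Int) :
    ∀ (d : Nat) (a b j : Int), (b - a).toNat = d →
    pvAFirst ps p t i (PySem.List.pyRange a b 1) = some j →
    a ≤ j ∧ j < b ∧
      PySem.Int.mod (PySem.List.pyGetD ps j 0 - PySem.List.pyGetD ps i 0) p = t ∧
      ∀ j', a ≤ j' → j' < j →
        PySem.Int.mod (PySem.List.pyGetD ps j' 0 - PySem.List.pyGetD ps i 0) p ≠ t := by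
  intro d
  induction d with
  | zero =>
    intro a b j hd h
    rw [PySem.List.pyRange_one_eq_nil (by omega)] at h
    simp [pvAFirst] at h
  | succ d ih =>
    intro a b j hd h
    have hab : a < b := by omega
    rw [PySem.List.pyRange_one_cons hab] at h
    simp only [pvAFirst] at h
    split at h
    · rename_i hc
      have hj : a = j := Option.some.inj h
      subst hj
      exact ⟨le_refl _, hab, hc, fun j' h1 h2 => by omega⟩
    · rename_i hc
      obtain ⟨h1, h2, h3, h4⟩ := ih (a + 1) b j (by omega) h
      refine ⟨by omega, h2, h3, ?_⟩
      intro j' ha hj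
      rcases eq_or_lt_of_le ha with he | hlt
      · rw [← he]; exact hc
      · exact h4 j' (by omega) hj

theorem pvAFirst_none_gen (ps : List Int) (p t i : Int) :
    ∀ (d : Nat) (a b : Int), (b - a).toNat = d →
    pvAFirst ps p t i (PySem.List.pyRange a b 1) = none →
    ∀ j', a ≤ j' → j' < b →
      PySem.Int.mod (PySem.List.pyGetD ps j' 0 - PySem.List.pyGetD ps i 0) p ≠ t := by
  intro d
  induction d with
  | zero =>
    intro a b hd _ j' h1 h2
    omega
  | succ d ih =>
    intro a b hd h
    have hab : a < b := by omega
    rw [PySem.List.pyRange_one_cons hab] at h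
    simp only [pvAFirst] at h
    split at h
    · exact absurd h (by simp)
    · rename_i hc
      intro j' h1 h2
      rcases eq_or_lt_of_le h1 with he | hlt
      · rw [← he]; exact hc
      · exact ih (a + 1) b (by omega) h j' (by omega) h2

theorem pvAFirst_some {nums : List Int} {p t : Int} {i : Nat} {j : Int}
    (hi : i < nums.length)
    (h : pvAFirst ((List.range (nums.length + 1)).map (pvG nums p)) p t (i : Int)
          (PySem.List.pyRange ((i : Int) + 1) ((nums.length : Int) + 1) 1) = some j) :
    ∃ jn : Nat, j = (jn : Int) ∧ i < jn ∧ jn ≤ nums.length ∧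
      PySem.Int.mod (pvG nums p jn - pvG nums p i) p = t ∧
      ∀ j' : Nat, i < j' → j' ≤ nums.length →
        PySem.Int.mod (pvG nums p j' - pvG nums p i) p = t → jn ≤ j' := by
  obtain ⟨h1, h2, h3, h4⟩ := pvAFirst_some_gen _ p t (i : Int)
    (((nums.length : Int) + 1) - ((i : Int) + 1)).toNat ((i : Int) + 1)
    ((nums.length : Int) + 1) j rfl h
  have hj0 : 0 ≤ j := by omega
  refine ⟨j.toNat, (Int.toNat_of_nonneg hj0).symm, ?_, ?_, ?_, ?_⟩
  · omega
  · omega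
  · have hjc : (j.toNat : Int) = j := Int.toNat_of_nonneg hj0
    have hjle : j.toNat ≤ nums.length := by omega
    rw [← pvPs_get nums p hjle, ← pvPs_get nums p (le_of_lt hi), hjc]
    exact h3
  · intro j' hj'1 hj'2 hc
    by_contra hlt
    rw [not_le] at hlt
    refine h4 (j' : Int) (by omega) (by omega) ?_
    rw [pvPs_get nums p hj'2, pvPs_get nums p (le_of_lt hi)]
    exact hc

theorem pvAFirst_none {nums : List Int} {p t : Int} {i : Nat}
    (hi : i < nums.length)
    (h : pvAFirst ((List.range (nums.length + 1)).map (pvG nums p)) p t (i : Int)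
          (PySem.List.pyRange ((i : Int) + 1) ((nums.length : Int) + 1) 1) = none) :
    ∀ j' : Nat, i < j' → j' ≤ nums.length →
      PySem.Int.mod (pvG nums p j' - pvG nums p i) p ≠ t := by
  intro j' hj'1 hj'2 hc
  refine pvAFirst_none_gen _ p t (i : Int)
    (((nums.length : Int) + 1) - ((i : Int) + 1)).toNat ((i : Int) + 1)
    ((nums.length : Int) + 1) rfl h (j' : Int)
    (by omega) (by omega) ?_
  rw [pvPs_get nums p hj'2, pvPs_get nums p (le_of_lt hi)]
  exact hc

-- A-side outer loop
theorem pvAOuter_spec {nums : List Int} {p t : Int} (hn : 2 ≤ nums.length)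
    (d : Nat) (K ml : Int)
    (hd : ((nums.length : Int) - K).toNat = d) (hK0 : 0 ≤ K) (hKn : K ≤ (nums.length : Int))
    (hml1 : 1 ≤ ml) (hmln : ml ≤ (nums.length : Int))
    (hmlv : ml = (nums.length : Int) ∨ pvValid nums p t ml)
    (hproc : ∀ (i j : Nat), (i : Int) < K → i < j → j ≤ nums.length →
      PySem.Int.mod (pvG nums p j - pvG nums p i) p = t → ml ≤ (j : Int) - (i : Int)) :
    ∃ m, pvIsBest nums p t m ∧
      pvAOuter ((List.range (nums.length + 1)).map (pvG nums p)) p t (nums.length : Int)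
          (PySem.List.pyRange K (nums.length : Int) 1) ml
        = if m = (nums.length : Int) then -1 else m := by
  induction d generalizing K ml with
  | zero =>
    have hKN : K = (nums.length : Int) := by omega
    subst hKN
    rw [PySem.List.pyRange_one_eq_nil (le_refl _)]
    refine ⟨ml, ⟨hmlv, hmln, ?_⟩, rfl⟩
    intro L hL
    obtain ⟨i, j, hij, hjn, hc, hLe⟩ := hL
    rw [hLe]
    exact hproc i j (by exact_mod_cast Nat.lt_of_lt_of_le hij hjn) hij hjn hc
  | succ d ih =>
    have hKN : K < (nums.length : Int) := by omega
    rw [PySem.List.pyRange_one_cons hKN]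
    simp only [pvAOuter]
    have hK : ((K.toNat : Int)) = K := Int.toNat_of_nonneg hK0
    have hKlt : K.toNat < nums.length := by omega
    -- analyse the inner loop
    cases hin : pvAFirst ((List.range (nums.length + 1)).map (pvG nums p)) p t K
        (PySem.List.pyRange (K + 1) ((nums.length : Int) + 1) 1) with
    | some j =>
      dsimp only
      rw [← hK] at hin
      obtain ⟨jn, hje, hjlt, hjle, hjc, hjmin⟩ := pvAFirst_some hKlt hin
      -- the new min_len
      have hval : pvValid nums p t ((jn : Int) - (K.toNat : Int)) :=
        ⟨K.toNat, jn, hjlt, hjle, hjc, rfl⟩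
      have hstep : ∀ (L : Int) (i' j' : Nat), (i' : Int) < K + 1 → i' < j' → j' ≤ nums.length →
          PySem.Int.mod (pvG nums p j' - pvG nums p i') p = t →
          L = (j' : Int) - (i' : Int) → min ml (j - K) ≤ L := by
        intro L i' j' hi'K hij' hj'n hc' hLe
        rcases lt_or_ge (i' : Int) K with hlt | hge
        · have := hproc i' j' hlt hij' hj'n hc'
          subst hLe; omega
        · have hi'e : (i' : Int) = K := by omega
          have hi'n : i' = K.toNat := by omega
          subst hi'n
          have := hjmin j' hij' hj'n hc'
          have hjj : (jn : Int) ≤ (j' : Int) := by exact_mod_cast this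
          subst hLe
          rw [hje, hi'e]
          omega
      by_cases h1 : min ml (j - K) = 1
      · rw [if_pos h1, h1]
        have hv1 : pvValid nums p t 1 := by
          rcases le_total ml (j - K) with hmm | hmm
          · rw [min_eq_left hmm] at h1
            rcases hmlv with he | hv
            · omega
            · rwa [h1] at hv
          · rw [min_eq_right hmm] at h1
            rw [hje, ← hK] at h1
            rwa [h1] at hval
        refine ⟨1, ⟨Or.inr hv1, by omega, fun L hL => pvValid_ge_one hL⟩, ?_⟩
        rw [if_neg (by omega)]
      · rw [if_neg h1]
        refine ih (K + 1) (min ml (j - K)) (by omega) (by omega) (by omega)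
          ?_ (by omega) ?_ ?_
        · rw [hje]
          have := hjlt
          omega
        · rcases le_total ml (j - K) with hmm | hmm
          · rw [min_eq_left hmm]; exact hmlv
          · rw [min_eq_right hmm]
            right
            rw [hK] at hval
            rw [hje]
            exact hval
        · intro i' j' hi' hij' hj'n hc'
          exact hstep _ i' j' hi' hij' hj'n hc' rfl
    | none =>
      dsimp only
      rw [← hK] at hin
      have hnone := pvAFirst_none hKlt hin
      have hstep : ∀ (i' j' : Nat), (i' : Int) < K + 1 → i' < j' → j' ≤ nums.length →
          PySem.Int.mod (pvG nums p j' - pvG nums p i') p = t → ml ≤ (j' : Int) - (i' : Int) := by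
        intro i' j' hi'K hij' hj'n hc'
        rcases lt_or_ge (i' : Int) K with hlt | hge
        · exact hproc i' j' hlt hij' hj'n hc'
        · have hi'n : i' = K.toNat := by omega
          subst hi'n
          exact absurd hc' (hnone j' hij' hj'n)
      by_cases h1 : ml = 1
      · rw [if_pos h1, h1]
        have hv1 : pvValid nums p t 1 := by
          rcases hmlv with he | hv
          · omega
          · rwa [h1] at hv
        refine ⟨1, ⟨Or.inr hv1, by omega, fun L hL => pvValid_ge_one hL⟩, ?_⟩
        rw [if_neg (by omega)]
      · rw [if_neg h1]
        exact ih (K + 1) ml (by omega) (by omega) (by omega) hml1 hmln hmlv hstep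

-- B-side: last index per remainder
def pvLastIdx (nums : List Int) (p : Int) : Nat → Int → Option Int
  | 0, r => if r = 0 then some 0 else none
  | k + 1, r => if pvG nums p (k + 1) = r then some ((k : Int) + 1) else pvLastIdx nums p k r

theorem pvLastIdx_some {nums : List Int} {p : Int} {k : Nat} {r v : Int}
    (h : pvLastIdx nums p k r = some v) :
    ∃ i : Nat, v = (i : Int) ∧ i ≤ k ∧ pvG nums p i = r ∧
      ∀ i' : Nat, i < i' → i' ≤ k → pvG nums p i' ≠ r := by
  induction k with
  | zero =>
    simp only [pvLastIdx] at h
    split at h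
    · rename_i hr
      refine ⟨0, by simpa using h.symm, le_refl _, by simpa [pvG] using hr.symm, ?_⟩
      intro i' h1 h2; omega
    · exact absurd h (by simp)
  | succ k ih =>
    simp only [pvLastIdx] at h
    split at h
    · rename_i hr
      refine ⟨k + 1, by exact_mod_cast (Option.some.inj h).symm, le_refl _, hr, ?_⟩
      intro i' h1 h2; omega
    · rename_i hr
      obtain ⟨i, hv, hik, hgi, hmax⟩ := ih h
      refine ⟨i, hv, Nat.le_succ_of_le hik, hgi, ?_⟩
      intro i' h1 h2
      rcases Nat.lt_succ_iff_lt_or_eq.mp (Nat.lt_succ_of_le h2) with h3 | h3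
      · exact hmax i' h1 (by omega)
      · subst h3; exact hr
  

theorem pvLastIdx_none {nums : List Int} {p : Int} {k : Nat} {r : Int}
    (h : pvLastIdx nums p k r = none) : ∀ i : Nat, i ≤ k → pvG nums p i ≠ r := by
  induction k with
  | zero =>
    intro i hi
    interval_cases i
    simp only [pvLastIdx] at h
    split at h
    · exact absurd h (by simp)
    · rename_i hr; simpa [pvG, eq_comm] using hr
  | succ k ih =>
    simp only [pvLastIdx] at h
    split at h
    · exact absurd h (by simp)
    · rename_i hr
      intro i hi
      rcases Nat.le_succ_iff.mp hi with h3 | h3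
      · exact ih h i h3
      · subst h3; exact hr

-- B-side fold
theorem pvBFoldAux {nums : List Int} {p t : Int} (hp : p ≠ 0)
    (ht : t = pvG nums p nums.length) :
    ∀ (rest : List Int) (k : Nat) (best : Int) (dict : PySem.Dict Int Int),
      nums.drop k = rest →
      (∀ r, dict.get? r = pvLastIdx nums p k r) →
      best ≤ (nums.length : Int) →
      (best = (nums.length : Int) ∨ pvValid nums p t best) →
      (∀ (i j : Nat), i < j → j ≤ k →
        PySem.Int.mod (pvG nums p j - pvG nums p i) p = t → best ≤ (j : Int) - (i : Int)) →
      pvIsBest nums p t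
        (((PySem.List.enumerate rest ((k : Int) + 1)).foldl
          (fun (st : Int × Int × PySem.Dict Int Int) (jx : Int × Int) =>
            let cur := PySem.Int.mod (st.2.1 + jx.2) p
            let need := PySem.Int.mod (cur - t) p
            let best :=
              match st.2.2.get? need with
              | some i => min st.1 (jx.1 - i)
              | none => st.1
            (best, cur, st.2.2.insert cur jx.1))
          (best, pvG nums p k, dict)).1) := by
  intro rest
  induction rest with
  | nil =>
    intro k best dict hdrop hdict hle hor hlb
    have hnk : nums.length ≤ k := by
      have := congrArg List.length hdrop
      simp at this
      omega
    simp only [PySem.List.enumerate, List.foldl_nil]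
    refine ⟨hor, hle, ?_⟩
    intro L hL
    obtain ⟨i, j, hij, hjn, hc, hLe⟩ := hL
    rw [hLe]
    exact hlb i j hij (by omega) hc
  | cons x rest' ih =>
    intro k best dict hdrop hdict hle hor hlb
    have hk : k < nums.length := by
      by_contra hcon
      rw [List.drop_eq_nil_of_le (by omega)] at hdrop
      exact List.cons_ne_nil x rest' hdrop.symm
    have hdc := List.drop_eq_getElem_cons hk
    rw [hdrop] at hdc
    have hx : x = nums[k] := (List.cons.injEq _ _ _ _ ▸ hdc).1
    have hrest' : rest' = nums.drop (k + 1) := (List.cons.injEq _ _ _ _ ▸ hdc).2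
    have hcur : PySem.Int.mod (pvG nums p k + x) p = pvG nums p (k + 1) := by
      simp only [pvG]
      rw [hx, List.getD_eq_getElem _ _ hk]
    simp only [PySem.List.enumerate, List.foldl_cons]
    rw [hcur]
    have htred : PySem.Int.mod t p = t := by rw [ht]; exact pvG_reduced nums hp _
    -- the lookup key
    set need := PySem.Int.mod (pvG nums p (k + 1) - t) p with hneed
    have hcond : ∀ i : Nat,
        (PySem.Int.mod (pvG nums p (k + 1) - pvG nums p i) p = t ↔ pvG nums p i = need) :=
      fun i => pvCondIff hp (pvG_reduced nums hp i) htred _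
    -- new dict invariant
    have hdict' : ∀ r, (dict.insert (pvG nums p (k + 1)) ((k : Int) + 1)).get? r
        = pvLastIdx nums p (k + 1) r := by
      intro r
      rw [PySem.Dict.get?_insert]
      simp only [pvLastIdx]
      by_cases hr : r = pvG nums p (k + 1)
      · rw [if_pos hr, if_pos hr.symm]
      · rw [if_neg hr, if_neg (fun hh => hr hh.symm), hdict]
    -- new best invariants
    have hnewlb : ∀ best',
        (best' ≤ best) →
        (∀ (i j : Nat), i < j → j = k + 1 →
          PySem.Int.mod (pvG nums p j - pvG nums p i) p = t → best' ≤ (j : Int) - (i : Int)) →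
        (∀ (i j : Nat), i < j → j ≤ k + 1 →
          PySem.Int.mod (pvG nums p j - pvG nums p i) p = t → best' ≤ (j : Int) - (i : Int)) := by
      intro best' hb hnew i j hij hjk hc
      rcases Nat.lt_succ_iff_lt_or_eq.mp (Nat.lt_succ_of_le hjk) with hlt | he
      · exact le_trans hb (hlb i j hij (by omega) hc)
      · exact hnew i j hij he hc
    have hstep : ∀ best',
        ((match dict.get? need with
          | some i => min best ((k : Int) + 1 - i)
          | none => best) = best') →
        best' ≤ (nums.length : Int) ∧
        (best' = (nums.length : Int) ∨ pvValid nums p t best') ∧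
        (∀ (i j : Nat), i < j → j ≤ k + 1 →
          PySem.Int.mod (pvG nums p j - pvG nums p i) p = t → best' ≤ (j : Int) - (i : Int)) := by
      intro best' hbe
      cases hget : dict.get? need with
      | some i0 =>
        rw [hget] at hbe
        dsimp only at hbe
        rw [hdict] at hget
        obtain ⟨i, hie, hik, hgi, hmax⟩ := pvLastIdx_some hget
        subst hie
        subst hbe
        have hvalid : pvValid nums p t ((k : Int) + 1 - (i : Int)) := by
          refine ⟨i, k + 1, by omega, by omega, (hcond i).mpr hgi, by push_cast; ring⟩
        constructor
        · exact le_trans (min_le_left _ _) hle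
        constructor
        · rcases le_total best ((k : Int) + 1 - (i : Int)) with hmm | hmm
          · rw [min_eq_left hmm]; exact hor
          · right; rw [min_eq_right hmm]; exact hvalid
        · refine hnewlb _ (min_le_left _ _) ?_
          intro i'' j'' hij'' hje'' hc''
          subst hje''
          have hgi'' : pvG nums p i'' = need := (hcond i'').mp hc''
          have hile : i'' ≤ i := by
            by_contra hgt
            exact hmax i'' (by omega) (by omega) hgi''
          have h5 : (i'' : Int) ≤ (i : Int) := by exact_mod_cast hile
          have hmr := min_le_right best ((k : Int) + 1 - (i : Int))
          exact le_trans hmr (by omega)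
      | none =>
        rw [hget] at hbe
        dsimp only at hbe
        rw [hdict] at hget
        have hnone := pvLastIdx_none hget
        subst hbe
        refine ⟨hle, hor, hnewlb best (le_refl _) ?_⟩
        intro i'' j'' hij'' hje'' hc''
        subst hje''
        exact absurd ((hcond i'').mp hc'') (hnone i'' (by omega))
    obtain ⟨h1, h2, h3⟩ := hstep _ rfl
    have hidx : ((k : Int) + 1) + 1 = (((k + 1 : Nat)) : Int) + 1 := by push_cast; ring
    rw [hidx]
    exact ih (k + 1) _ _ hrest'.symm hdict' h1 h2 h3

theorem pvBFold_spec {nums : List Int} {p t : Int} (hp : p ≠ 0)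
    (ht : t = pvG nums p nums.length) :
    ∃ best cur dict,
      (PySem.List.enumerate nums 1).foldl
        (fun (st : Int × Int × PySem.Dict Int Int) (jx : Int × Int) =>
          let cur := PySem.Int.mod (st.2.1 + jx.2) p
          let need := PySem.Int.mod (cur - t) p
          let best :=
            match st.2.2.get? need with
            | some i => min st.1 (jx.1 - i)
            | none => st.1
          (best, cur, st.2.2.insert cur jx.1))
        ((nums.length : Int), 0, PySem.Dict.ofList [((0 : Int), (0 : Int))])
        = (best, cur, dict) ∧ pvIsBest nums p t best := by
  have hdict0 : ∀ r, (PySem.Dict.ofList [((0 : Int), (0 : Int))]).get? r = pvLastIdx nums p 0 r := by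
    intro r
    have hof : (PySem.Dict.ofList [((0 : Int), (0 : Int))])
        = PySem.Dict.mk [((0 : Int), (0 : Int))] := by rfl
    rw [hof, PySem.Dict.get?_mk_cons]
    simp only [pvLastIdx]
    by_cases hr : r = 0
    · subst hr; simp
    · rw [if_neg hr, if_neg (by simpa using Ne.symm hr)]
      rfl
  have haux := pvBFoldAux hp ht nums 0 (nums.length : Int)
    (PySem.Dict.ofList [((0 : Int), (0 : Int))]) rfl hdict0 (le_refl _) (Or.inl rfl)
    (fun i j hij hj0 _ => by omega)
  have h01 : ((0 : Nat) : Int) + 1 = 1 := by norm_num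
  rw [h01] at haux
  rcases hres : ((PySem.List.enumerate nums 1).foldl _ _) with ⟨b, c, d⟩
  refine ⟨b, c, d, rfl, ?_⟩
  have : pvG nums p 0 = 0 := rfl
  rw [this] at haux
  rw [hres] at haux
  exact haux

-- ===== VERDICT (by name: the statement is the Claim_ definition above) =====
theorem pvHeadD (nums : List Int) : nums.headD 0 = nums.getD 0 0 := by
  cases nums <;> rfl

theorem minSubarray_tle_spec : Claim_unchanged_minSubarray_tle := by
  intro nums p _ hp hnd
  show minSubarray_tle nums p = minSubarray_tle_alt nums p
  simp only [minSubarray_tle, minSubarray_tle_alt, pvPrefix_eq, pvPs_last, pvSum_eq nums hp]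
  by_cases ht : pvG nums p nums.length = 0
  · rw [if_pos ht, if_pos ht]
  · rw [if_neg ht, if_neg ht]
    have hn2 : 2 ≤ nums.length := by
      rcases hlen : nums.length with _ | _ | k
      · exact absurd (hlen ▸ ht) (by simp [pvG])
      · exfalso
        refine hnd ⟨hlen, ?_⟩
        rw [pvHeadD]
        have : pvG nums p 1 = PySem.Int.mod (nums.getD 0 0) p := by
          simp [pvG]
        rw [← this]
        rw [hlen] at ht
        simpa using ht
      · omega
    obtain ⟨m, hbm, hA⟩ := pvAOuter_spec (t := pvG nums p nums.length) hn2
      ((nums.length : Int) - 0).toNat 0 (nums.length : Int) rfl le_rfl (by exact_mod_cast Nat.zero_le _)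
      (by exact_mod_cast Nat.one_le_iff_ne_zero.mpr (by omega)) le_rfl (Or.inl rfl)
      (fun i j hi _ _ _ => absurd hi (by omega))
    obtain ⟨best, cur, dict, hBeq, hbb⟩ := pvBFold_spec hp rfl
    rw [hA, hBeq]
    have hmb : m = best := pvBest_unique (by omega) hbm hbb
    rw [hmb]

theorem minSubarray_tle_changed : Claim_changed_minSubarray_tle := by
  unfold Claim_changed_minSubarray_tle; decide

theorem minSubarray_tle_tight : Claim_exact_minSubarray_tle := by
  intro nums p _ hp hd
  obtain ⟨hlen, hmod⟩ := hd
  obtain ⟨x, hx⟩ := List.length_eq_one_iff.mp hlen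
  subst hx
  have hmx : PySem.Int.mod x p ≠ 0 := by simpa [pvHeadD] using hmod
  have hB : minSubarray_tle_alt [x] p = -1 := by
    simp only [minSubarray_tle_alt, List.length_cons, List.length_nil, List.sum_cons,
      List.sum_nil, add_zero, zero_add, PySem.List.enumerate, List.foldl_cons, List.foldl_nil]
    rw [if_neg hmx]
    simp only [sub_self, pvMod_zero]
    norm_num
    decide
  have hA : minSubarray_tle [x] p = 1 := by
    simp only [minSubarray_tle, List.foldl_cons, List.foldl_nil, List.length_cons,
      List.length_nil, List.singleton_append]
    have hg0 : PySem.List.pyGetD [(0 : Int)] (-1) 0 = 0 := by decide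
    rw [hg0, zero_add]
    have hg1 : PySem.List.pyGetD [(0 : Int), PySem.Int.mod x p] (-1) 0 = PySem.Int.mod x p := by
      simp [PySem.List.pyGetD, PySem.List.pyGet?, PySem.List.pyIdx?]
    rw [hg1, if_neg hmx]
    have hr0 : PySem.List.pyRange 0 (0 + 1) 1 = [0] := by decide
    norm_num at hr0 ⊢
    rw [hr0]
    simp only [pvAOuter]
    have hr1 : PySem.List.pyRange ((0 : Int) + 1) ((1 : Int) + 1) 1 = [1] := by decide
    rw [hr1]
    simp only [pvAFirst]
    have hp0 : PySem.List.pyGetD [(0 : Int), PySem.Int.mod x p] 0 0 = 0 := by simp [PySem.List.pyGetD, PySem.List.pyGet?, PySem.List.pyIdx?]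
    have hp1 : PySem.List.pyGetD [(0 : Int), PySem.Int.mod x p] 1 0 = PySem.Int.mod x p := by
      simp [PySem.List.pyGetD, PySem.List.pyGet?, PySem.List.pyIdx?]
    rw [hp0, hp1, sub_zero, pvModIdem hp]
    rw [if_pos rfl]
    norm_num
  rw [hA, hB]
  decide
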